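-- pv_equiv track=rewrite | github.com/wenlisong/coding-everyday | Array/clockwisePrint.py | circlePrint
-- ===== SOURCE A (Python) =====
-- def circlePrint(matrix, rows, cols, start):
--     res = []
--     i = start
--     while i < cols - start:
--         res.append(matrix[start][i])
--         i += 1
--     i = start + 1
--     while i < rows - start:
--         res.append(matrix[i][cols - 1 - start])
--         i += 1
--
--     if rows - 1 - start > start:
--         i = cols - 2 - start
--         while i >= start:
--             res.append(matrix[rows - 1 - start][i])
--             i -= 1
--     if start < cols - 1 - start:
--         i = rows - 2 - start
--         while i >= start+1:
--             res.append(matrix[i][start])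
--             i -= 1
--     return res
-- ===== SOURCE B (Python) =====
-- def circlePrint(matrix, rows, cols, start):
--     # single clockwise position-walk over the ring, counting the perimeter
--     top = left = start
--     bottom = rows - 1 - start
--     right = cols - 1 - start
--     if top > bottom or left > right:
--         return []
--     if top == bottom:
--         perim = right - left + 1
--     elif left == right:
--         perim = bottom - top + 1
--     else:
--         perim = 2 * ((bottom - top) + (right - left))
--     dirs = [(0, 1), (1, 0), (0, -1), (-1, 0)]
--     r, c, d = top, left, 0
--     res = []
--     for _ in range(perim):
--         res.append(matrix[r][c])
--         dr, dc = dirs[d]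
--         nr, nc = r + dr, c + dc
--         if not (top <= nr <= bottom and left <= nc <= right):
--             d = (d + 1) % 4
--             dr, dc = dirs[d]
--             nr, nc = r + dr, c + dc
--         r, c = nr, nc
--     return res
-- ===== Notes on version B (the rewrite author's own statement) =====
-- stated objective: alternative
-- what changed: Replaced A's four separate guarded index loops (top row, right column, bottom row, left column) by a single clockwise position-walk: one loop over the perimeter count that maintains (r,c) and a direction cycle, turning when the next cell would leave the ring bounds; B returns [] when the ring [start..rows-1-start]x[start..cols-1-start] is empty.
-- outside the precondition, e.g. on circlePrint([[1, 2, 3, 4, 5], [6, 7, 8, 9, 10]], 2, 5, 1): A returns [7, 8, 9], B returns []; on circlePrint([[1], [2], [3], [4]], 4, 1, 1): A returns [3], B returns []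
import Mathlib
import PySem

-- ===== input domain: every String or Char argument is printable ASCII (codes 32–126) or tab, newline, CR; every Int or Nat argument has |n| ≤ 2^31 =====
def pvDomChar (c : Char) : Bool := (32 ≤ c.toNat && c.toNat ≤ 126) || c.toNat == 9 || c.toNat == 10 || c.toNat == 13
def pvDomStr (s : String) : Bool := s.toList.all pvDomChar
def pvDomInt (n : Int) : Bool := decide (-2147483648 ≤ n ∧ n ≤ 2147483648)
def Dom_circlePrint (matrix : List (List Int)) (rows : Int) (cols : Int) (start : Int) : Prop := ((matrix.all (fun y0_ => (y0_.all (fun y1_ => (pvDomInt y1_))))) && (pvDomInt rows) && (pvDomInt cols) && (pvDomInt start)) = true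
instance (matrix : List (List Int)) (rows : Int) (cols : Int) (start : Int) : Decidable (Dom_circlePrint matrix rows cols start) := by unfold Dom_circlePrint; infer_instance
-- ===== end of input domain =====

-- B re-implements A's four separate ring loops as one clockwise position-walk
-- (bounds + direction cycle + perimeter count); equivalence is proved on valid
-- rectangular rings plus the untouched empty region (see Pre_circlePrint).

-- matrix[r][c] (indices are in range on every admitted input)
def mGet (m : List (List Int)) (r c : Int) : Int :=
  (PySem.List.pyGet? ((PySem.List.pyGet? m r).getD []) c).getD 0

-- ===== PORT A =====
def loopA1 (m : List (List Int)) (cols s i : Int) (res : List Int) : List Int :=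
  if i < cols - s then loopA1 m cols s (i + 1) (res ++ [mGet m s i]) else res
termination_by (cols - s - i).toNat
decreasing_by omega

def loopA2 (m : List (List Int)) (rows cols s i : Int) (res : List Int) : List Int :=
  if i < rows - s then loopA2 m rows cols s (i + 1) (res ++ [mGet m i (cols - 1 - s)]) else res
termination_by (rows - s - i).toNat
decreasing_by omega

def loopA3 (m : List (List Int)) (rows s i : Int) (res : List Int) : List Int :=
  if i ≥ s then loopA3 m rows s (i - 1) (res ++ [mGet m (rows - 1 - s) i]) else res
termination_by (i - s + 1).toNat
decreasing_by omega

def loopA4 (m : List (List Int)) (s i : Int) (res : List Int) : List Int :=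
  if i ≥ s + 1 then loopA4 m s (i - 1) (res ++ [mGet m i s]) else res
termination_by (i - s).toNat
decreasing_by omega

def circlePrint (matrix : List (List Int)) (rows : Int) (cols : Int) (start : Int) : List Int :=
  let res := loopA1 matrix cols start start []
  let res := loopA2 matrix rows cols start (start + 1) res
  let res := if rows - 1 - start > start then loopA3 matrix rows start (cols - 2 - start) res else res
  let res := if start < cols - 1 - start then loopA4 matrix start (rows - 2 - start) res else res
  res

-- ===== PORT B =====
-- dirs = [(0,1),(1,0),(0,-1),(-1,0)]
def dirB : Nat → Int × Int
  | 0 => (0, 1)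
  | 1 => (1, 0)
  | 2 => (0, -1)
  | _ => (-1, 0)

def walkB (m : List (List Int)) (top bottom left right : Int) :
    Nat → Int → Int → Nat → List Int → List Int
  | 0, _, _, _, res => res
  | n + 1, r, c, d, res =>
    if top ≤ r + (dirB d).1 ∧ r + (dirB d).1 ≤ bottom ∧ left ≤ c + (dirB d).2 ∧ c + (dirB d).2 ≤ right then
      walkB m top bottom left right n (r + (dirB d).1) (c + (dirB d).2) d (res ++ [mGet m r c])
    else
      walkB m top bottom left right n (r + (dirB ((d + 1) % 4)).1) (c + (dirB ((d + 1) % 4)).2) ((d + 1) % 4) (res ++ [mGet m r c])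

def circlePrint_alt (matrix : List (List Int)) (rows : Int) (cols : Int) (start : Int) : List Int :=
  let top := start
  let left := start
  let bottom := rows - 1 - start
  let right := cols - 1 - start
  if top > bottom ∨ left > right then []
  else
    let perim : Int :=
      if top = bottom then right - left + 1
      else if left = right then bottom - top + 1
      else 2 * ((bottom - top) + (right - left))
    walkB matrix top bottom left right perim.toNat top left 0 []

-- ===== PRECONDITION & SPEC =====
-- Pre_ admits (a) genuine rings: 0 ≤ start, a rectangular rows×cols matrix and 2*start below
-- both dimensions (there neither program raises), and (b) the region where A returns []
-- without touching the matrix. It excludes negative start and starts past the ring bounds,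
-- where A still returns an accidental partial segment (sometimes via Python negative-index
-- wraparound) driven by which of its four guards happen to fire.
def Pre_circlePrint (matrix : List (List Int)) (rows : Int) (cols : Int) (start : Int) : Prop :=
  0 ≤ start ∧
    ((2 * start < rows ∧ 2 * start < cols ∧ rows = (matrix.length : Int) ∧
        ∀ row ∈ matrix, (row.length : Int) = cols) ∨
      (cols ≤ 2 * start ∧ rows - 1 ≤ 2 * start))
instance (matrix : List (List Int)) (rows : Int) (cols : Int) (start : Int) : Decidable (Pre_circlePrint matrix rows cols start) := by unfold Pre_circlePrint; infer_instance

def pvWitness_circlePrint : List (List Int) × Int × Int × Int :=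
  ([[1, 2, 3], [4, 5, 6], [7, 8, 9]], 3, 3, 0)

def Spec_circlePrint (matrix : List (List Int)) (rows : Int) (cols : Int) (start : Int) (out : List Int) : Prop := out = circlePrint_alt matrix rows cols start
instance (matrix : List (List Int)) (rows : Int) (cols : Int) (start : Int) (out : List Int) : Decidable (Spec_circlePrint matrix rows cols start out) := by unfold Spec_circlePrint; infer_instance

-- ===== CLAIM (what is proved, stated in full; the proofs are below) =====
def Claim_equal_circlePrint : Prop := ∀ (matrix : List (List Int)) (rows : Int) (cols : Int) (start : Int), Dom_circlePrint matrix rows cols start → Pre_circlePrint matrix rows cols start → Spec_circlePrint matrix rows cols start (circlePrint matrix rows cols start)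

-- ===== LEMMAS AND PROOFS =====

/-- `[a, a+1, …, a+n-1]` -/
def ascI (a : Int) (n : Nat) : List Int := (List.range n).map (fun (k : Nat) => a + (k : Int))

/-- `[a, a-1, …, a-n+1]` -/
def descI (a : Int) (n : Nat) : List Int := (List.range n).map (fun (k : Nat) => a - (k : Int))

theorem ascI_zero (a : Int) : ascI a 0 = [] := rfl

theorem descI_zero (a : Int) : descI a 0 = [] := rfl

theorem ascI_succ (a : Int) (n : Nat) : ascI a (n + 1) = a :: ascI (a + 1) n := by
  unfold ascI
  rw [List.range_succ_eq_map, List.map_cons, List.map_map]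
  refine congrArg₂ _ (by simp) (List.map_congr_left (fun k _ => ?_))
  simp [Function.comp]
  ring

theorem descI_succ (a : Int) (n : Nat) : descI a (n + 1) = a :: descI (a - 1) n := by
  unfold descI
  rw [List.range_succ_eq_map, List.map_cons, List.map_map]
  refine congrArg₂ _ (by simp) (List.map_congr_left (fun k _ => ?_))
  simp [Function.comp]
  ring

theorem loopA1_eq (m : List (List Int)) (cols s : Int) :
    ∀ (n : Nat) (i : Int) (res : List Int), (cols - s - i).toNat = n →
      loopA1 m cols s i res = res ++ (ascI i n).map (fun j => mGet m s j) := by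
  intro n
  induction n with
  | zero => intro i res h; rw [loopA1]; rw [if_neg (by omega)]; simp [ascI_zero]
  | succ k ih =>
    intro i res h
    rw [loopA1, if_pos (by omega), ih (i + 1) _ (by omega), ascI_succ]
    simp

theorem loopA2_eq (m : List (List Int)) (rows cols s : Int) :
    ∀ (n : Nat) (i : Int) (res : List Int), (rows - s - i).toNat = n →
      loopA2 m rows cols s i res = res ++ (ascI i n).map (fun j => mGet m j (cols - 1 - s)) := by
  intro n
  induction n with
  | zero => intro i res h; rw [loopA2]; rw [if_neg (by omega)]; simp [ascI_zero]
  | succ k ih =>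
    intro i res h
    rw [loopA2, if_pos (by omega), ih (i + 1) _ (by omega), ascI_succ]
    simp

theorem loopA3_eq (m : List (List Int)) (rows s : Int) :
    ∀ (n : Nat) (i : Int) (res : List Int), (i - s + 1).toNat = n →
      loopA3 m rows s i res = res ++ (descI i n).map (fun j => mGet m (rows - 1 - s) j) := by
  intro n
  induction n with
  | zero => intro i res h; rw [loopA3]; rw [if_neg (by omega)]; simp [descI_zero]
  | succ k ih =>
    intro i res h
    rw [loopA3, if_pos (by omega), ih (i - 1) _ (by omega), descI_succ]
    simp

theorem loopA4_eq (m : List (List Int)) (s : Int) :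
    ∀ (n : Nat) (i : Int) (res : List Int), (i - s).toNat = n →
      loopA4 m s i res = res ++ (descI i n).map (fun j => mGet m j s) := by
  intro n
  induction n with
  | zero => intro i res h; rw [loopA4]; rw [if_neg (by omega)]; simp [descI_zero]
  | succ k ih =>
    intro i res h
    rw [loopA4, if_pos (by omega), ih (i - 1) _ (by omega), descI_succ]
    simp

theorem run_right (m : List (List Int)) (top bottom left right : Int)
    (htb : top ≤ bottom) :
    ∀ (k : Nat) (rest : Nat) (c : Int) (res : List Int),
      c = right - (k : Int) → left ≤ c →
      walkB m top bottom left right (k + 1 + rest) top c 0 res =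
        walkB m top bottom left right rest (top + 1) right 1
          (res ++ (ascI c (k + 1)).map (fun j => mGet m top j)) := by
  intro k
  induction k with
  | zero =>
    intro rest c res hc hl
    subst hc
    have e : 0 + 1 + rest = rest + 1 := by omega
    rw [e, walkB, if_neg (by simp [dirB] <;> omega)]
    simp [dirB, ascI_succ, ascI_zero, sub_eq_add_neg]
  | succ k ih =>
    intro rest c res hc hl
    have : k + 1 + 1 + rest = (k + 1 + rest) + 1 := by omega
    rw [this, walkB, if_pos (by simp [dirB] <;> omega)]
    have h2 := ih rest (c + (dirB 0).2) (res ++ [mGet m top c]) (by simp [dirB] <;> omega)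
      (by simp [dirB] <;> omega)
    simp only [dirB, add_zero] at h2 ⊢
    rw [h2]
    simp [ascI_succ]

theorem run_down (m : List (List Int)) (top bottom left right : Int)
    (hlr : left ≤ right) :
    ∀ (k : Nat) (rest : Nat) (r : Int) (res : List Int),
      r = bottom - (k : Int) → top ≤ r →
      walkB m top bottom left right (k + 1 + rest) r right 1 res =
        walkB m top bottom left right rest bottom (right - 1) 2
          (res ++ (ascI r (k + 1)).map (fun j => mGet m j right)) := by
  intro k
  induction k with
  | zero =>
    intro rest r res hr ht
    subst hr
    have e : 0 + 1 + rest = rest + 1 := by omega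
    rw [e, walkB, if_neg (by simp [dirB] <;> omega)]
    simp [dirB, ascI_succ, ascI_zero, sub_eq_add_neg]
  | succ k ih =>
    intro rest r res hr ht
    have : k + 1 + 1 + rest = (k + 1 + rest) + 1 := by omega
    rw [this, walkB, if_pos (by simp [dirB] <;> omega)]
    have h2 := ih rest (r + (dirB 1).1) (res ++ [mGet m r right]) (by simp [dirB] <;> omega)
      (by simp [dirB] <;> omega)
    simp only [dirB, add_zero] at h2 ⊢
    rw [h2]
    simp [ascI_succ]

theorem run_left (m : List (List Int)) (top bottom left right : Int)
    (htb : top ≤ bottom) :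
    ∀ (k : Nat) (rest : Nat) (c : Int) (res : List Int),
      c = left + (k : Int) → c ≤ right →
      walkB m top bottom left right (k + 1 + rest) bottom c 2 res =
        walkB m top bottom left right rest (bottom - 1) left 3
          (res ++ (descI c (k + 1)).map (fun j => mGet m bottom j)) := by
  intro k
  induction k with
  | zero =>
    intro rest c res hc hr
    subst hc
    have e : 0 + 1 + rest = rest + 1 := by omega
    rw [e, walkB, if_neg (by simp [dirB] <;> omega)]
    simp [dirB, descI_succ, descI_zero, sub_eq_add_neg]
  | succ k ih =>
    intro rest c res hc hr
    have : k + 1 + 1 + rest = (k + 1 + rest) + 1 := by omega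
    rw [this, walkB, if_pos (by simp [dirB] <;> omega)]
    have h2 := ih rest (c + (dirB 2).2) (res ++ [mGet m bottom c]) (by simp [dirB] <;> omega)
      (by simp [dirB] <;> omega)
    simp only [dirB, add_zero] at h2 ⊢
    rw [h2]
    simp [descI_succ, sub_eq_add_neg]

theorem run_up (m : List (List Int)) (top bottom left right : Int)
    (hlr : left ≤ right) :
    ∀ (k : Nat) (r : Int) (res : List Int),
      r = top + 1 + (k : Int) → r ≤ bottom →
      walkB m top bottom left right (k + 1) r left 3 res =
        res ++ (descI r (k + 1)).map (fun j => mGet m j left) := by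
  intro k
  induction k with
  | zero =>
    intro r res hr hrb
    rw [walkB, if_pos (by simp [dirB] <;> omega)]
    simp [walkB, descI_succ, descI_zero, sub_eq_add_neg, hr]
  | succ k ih =>
    intro r res hr hrb
    rw [walkB, if_pos (by simp [dirB] <;> omega)]
    have h2 := ih (r + (dirB 3).1) (res ++ [mGet m r left]) (by simp [dirB] <;> omega)
      (by simp [dirB] <;> omega)
    simp only [dirB, add_zero] at h2 ⊢
    rw [h2]
    simp [descI_succ, sub_eq_add_neg]

-- ===== VERDICT (by name: the statement is the Claim_ definition above) =====
theorem circlePrint_spec : Claim_equal_circlePrint := by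
  intro m rows cols s _hDom hPre
  unfold Spec_circlePrint
  obtain ⟨hs, hcase⟩ := hPre
  rcases hcase with ⟨hr, hc, _hlen, _hrect⟩ | ⟨hc, hr⟩
  · -- genuine ring
    have hA1 := loopA1_eq m cols s ((cols - 1 - 2 * s).toNat + 1) s [] (by omega)
    have hA2 := loopA2_eq m rows cols s ((rows - 1 - 2 * s).toNat) (s + 1)
      (loopA1 m cols s s []) (by omega)
    show circlePrint m rows cols s = circlePrint_alt m rows cols s
    unfold circlePrint circlePrint_alt
    dsimp only
    rw [if_neg (show ¬(s > rows - 1 - s ∨ s > cols - 1 - s) by omega)]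
    rw [hA2, hA1]
    by_cases h1 : s = rows - 1 - s
    · -- single-row ring
      rw [if_pos h1]
      have hdec : (cols - 1 - s - s + 1).toNat = (cols - 1 - 2 * s).toNat + 1 + 0 := by omega
      rw [hdec, run_right m s (rows - 1 - s) s (cols - 1 - s) (by omega)
        ((cols - 1 - 2 * s).toNat) 0 s [] (by omega) (by omega)]
      rw [walkB]
      rw [show (rows - 1 - 2 * s).toNat = 0 by omega, ascI_zero]
      rw [if_neg (show ¬(rows - 1 - s > s) by omega)]
      by_cases h4 : s < cols - 1 - s
      · rw [if_pos h4, loopA4_eq m s 0 (rows - 2 - s) _ (by omega), descI_zero]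
        simp
      · rw [if_neg h4]
        simp
    · rw [if_neg h1]
      by_cases h2 : s = cols - 1 - s
      · -- single-column ring
        rw [if_pos h2]
        rw [show (cols - 1 - 2 * s).toNat = 0 by omega]
        have hdec : (rows - 1 - s - s + 1).toNat =
            0 + 1 + ((rows - 2 - 2 * s).toNat + 1 + 0) := by omega
        rw [hdec, run_right m s (rows - 1 - s) s (cols - 1 - s) (by omega)
          0 _ s [] (by omega) (by omega)]
        rw [run_down m s (rows - 1 - s) s (cols - 1 - s) (by omega)
          ((rows - 2 - 2 * s).toNat) 0 (s + 1) _ (by omega) (by omega)]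
        rw [walkB]
        rw [if_pos (show rows - 1 - s > s by omega)]
        rw [loopA3_eq m rows s 0 (cols - 2 - s) _ (by omega), descI_zero]
        rw [if_neg (show ¬(s < cols - 1 - s) by omega)]
        rw [show (rows - 1 - 2 * s).toNat = (rows - 2 - 2 * s).toNat + 1 by omega]
        simp [ascI_succ]
      · -- full ring
        rw [if_neg h2]
        have hdec : (2 * (rows - 1 - s - s + (cols - 1 - s - s))).toNat =
            (cols - 1 - 2 * s).toNat + 1 + ((rows - 2 - 2 * s).toNat + 1 +
              ((cols - 2 - 2 * s).toNat + 1 + (rows - 2 - 2 * s).toNat)) := by omega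
        rw [hdec, run_right m s (rows - 1 - s) s (cols - 1 - s) (by omega)
          ((cols - 1 - 2 * s).toNat) _ s [] (by omega) (by omega)]
        rw [run_down m s (rows - 1 - s) s (cols - 1 - s) (by omega)
          ((rows - 2 - 2 * s).toNat) _ (s + 1) _ (by omega) (by omega)]
        rw [run_left m s (rows - 1 - s) s (cols - 1 - s) (by omega)
          ((cols - 2 - 2 * s).toNat) _ (cols - 1 - s - 1) _ (by omega) (by omega)]
        rw [show cols - 1 - s - 1 = cols - 2 - s by ring,
          show rows - 1 - s - 1 = rows - 2 - s by ring]
        rw [if_pos (show rows - 1 - s > s by omega)]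
        rw [loopA3_eq m rows s ((cols - 2 - 2 * s).toNat + 1) (cols - 2 - s) _ (by omega)]
        rw [if_pos (show s < cols - 1 - s by omega)]
        rw [loopA4_eq m s ((rows - 2 - 2 * s).toNat) (rows - 2 - s) _ (by omega)]
        rw [show (rows - 1 - 2 * s).toNat = (rows - 2 - 2 * s).toNat + 1 by omega]
        by_cases hlast : (rows - 2 - 2 * s).toNat = 0
        · rw [hlast, walkB, descI_zero]
          simp [ascI_succ]
        · obtain ⟨k', hk'⟩ : ∃ k', (rows - 2 - 2 * s).toNat = k' + 1 :=
            ⟨(rows - 2 - 2 * s).toNat - 1, by omega⟩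
          rw [hk', run_up m s (rows - 1 - s) s (cols - 1 - s) (by omega)
            k' (rows - 2 - s) _ (by omega) (by omega)]
  · -- start beyond both dimensions: both sides return []
    show circlePrint m rows cols s = circlePrint_alt m rows cols s
    unfold circlePrint circlePrint_alt
    dsimp only
    rw [if_pos (show s > rows - 1 - s ∨ s > cols - 1 - s by omega)]
    rw [loopA1, if_neg (show ¬(s < cols - s) by omega)]
    rw [loopA2, if_neg (show ¬(s + 1 < rows - s) by omega)]
    rw [if_neg (show ¬(rows - 1 - s > s) by omega)]
    rw [if_neg (show ¬(s < cols - 1 - s) by omega)]
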